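-- pv_equiv track=rewrite | github.com/woj667/ttt_new | game/Game.py | _check_fields
-- ===== SOURCE A (Python) =====
-- def _check_fields(dct, lst):
--
--     values = []
--
--     for key in lst:
--         values.append(dct.get(key))
--
--     same = True
--     for i in range(len(values) - 1):
--         if values[i] != values[i + 1] or values[i] is None:
--              same = False
--
--     return same
-- ===== SOURCE B (Python) =====
-- def _check_fields(dct, lst):
--     if len(lst) <= 1:
--         return True
--     distinct = {dct.get(key) for key in lst}
--     return len(distinct) == 1 and None not in distinct
-- ===== Notes on version B (the rewrite author's own statement) =====
-- stated objective: alternative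
-- what changed: Replaces A's adjacent-pair index scan with a false-latching flag by building the SET of looked-up values and deciding via its cardinality: for len(lst)>1 return len(distinct)==1 and None not in distinct.
import Mathlib
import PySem

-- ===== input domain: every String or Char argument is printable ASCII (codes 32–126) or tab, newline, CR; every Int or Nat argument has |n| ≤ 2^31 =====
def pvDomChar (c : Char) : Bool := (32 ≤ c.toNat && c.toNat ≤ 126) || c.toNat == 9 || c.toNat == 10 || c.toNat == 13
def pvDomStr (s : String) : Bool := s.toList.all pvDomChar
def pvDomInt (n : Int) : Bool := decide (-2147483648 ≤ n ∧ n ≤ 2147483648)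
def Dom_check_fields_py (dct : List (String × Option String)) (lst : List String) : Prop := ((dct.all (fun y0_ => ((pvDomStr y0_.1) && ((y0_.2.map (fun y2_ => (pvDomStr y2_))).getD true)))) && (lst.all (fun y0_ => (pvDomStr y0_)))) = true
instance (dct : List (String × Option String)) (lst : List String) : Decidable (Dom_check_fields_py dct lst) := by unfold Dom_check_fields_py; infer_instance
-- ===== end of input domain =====

-- B replaces A's adjacent-pair index scan by building the set of looked-up values and checking its cardinality (objective: alternative).

-- ===== PORT A =====
-- literal transliteration of _check_fields: build `values` by appending dct.get(key),
-- then scan i in range(len(values)-1) setting `same = False` on a mismatching or None pair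
def check_fields_py (dct : List (String × Option String)) (lst : List String) : Bool :=
  let d := PySem.Dict.mk dct
  let values : List (Option String) :=
    lst.foldl (fun values key => values ++ [PySem.Dict.getD d key none]) []
  let same : Bool :=
    (PySem.List.pyRange 0 ((values.length : Int) - 1) 1).foldl
      (fun same i =>
        if (PySem.List.pyGetD values i none != PySem.List.pyGetD values (i + 1) none)
            || (PySem.List.pyGetD values i none == none)
        then false else same)
      true
  same

-- ===== PORT B =====
-- transliteration of Source B: explicit len(lst)<=1 case, then the set comprehension
-- {dct.get(key) for key in lst} and the cardinality / membership test
def check_fields_py_alt (dct : List (String × Option String)) (lst : List String) : Bool :=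
  if lst.length ≤ 1 then true
  else
    let d := PySem.Dict.mk dct
    let distinct : PySem.Set (Option String) :=
      PySem.Set.ofList (lst.map (fun key => PySem.Dict.getD d key none))
    (PySem.Set.len distinct == 1) && !(PySem.Set.contains distinct none)

-- ===== PRECONDITION & SPEC =====
def Spec_check_fields_py (dct : List (String × Option String)) (lst : List String) (out : Bool) : Prop := out = check_fields_py_alt dct lst
instance (dct : List (String × Option String)) (lst : List String) (out : Bool) : Decidable (Spec_check_fields_py dct lst out) := by unfold Spec_check_fields_py; infer_instance

-- ===== CLAIM (what is proved, stated in full; the proofs are below) =====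
def Claim_equal_check_fields_py : Prop := ∀ (dct : List (String × Option String)) (lst : List String), Dom_check_fields_py dct lst → Spec_check_fields_py dct lst (check_fields_py dct lst)

-- ===== LEMMAS AND PROOFS =====

-- A's false-latching flag loop is `b && all (not ∘ bad)`
theorem pv_foldl_flag {α : Type} (p : α → Bool) (l : List α) (b : Bool) :
    l.foldl (fun s i => if p i then false else s) b = (b && l.all (fun i => !p i)) := by
  induction l generalizing b with
  | nil => simp
  | cons a t ih =>
    simp only [List.foldl_cons, List.all_cons, ih]
    cases p a <;> cases b <;> simp

-- the adjacent-pair chain condition collapses to the pivot form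
theorem pv_chain_eq (v0 : Option String) (vs : List (Option String)) :
    (List.range vs.length).all
        (fun k => !(((v0 :: vs).getD k none != (v0 :: vs).getD (k + 1) none)
            || ((v0 :: vs).getD k none == none)))
      = (vs.isEmpty || (v0.isSome && vs.all (fun v => v == v0))) := by
  induction vs generalizing v0 with
  | nil => simp
  | cons v1 rest ih =>
    rw [List.length_cons, List.range_succ_eq_map]
    simp only [List.all_cons, List.all_map]
    have h2 : (List.range rest.length).all
        (fun k => !(((v1 :: rest).getD k none != (v1 :: rest).getD (k + 1) none)
            || ((v1 :: rest).getD k none == none)))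
        = (rest.isEmpty || (v1.isSome && rest.all (fun v => v == v1))) := ih v1
    by_cases hv : v0 = v1
    · subst hv
      simp only [Function.comp_def, Nat.succ_eq_add_one]
      have hshift : ((List.range rest.length).all
          (fun k => !(((v0 :: v0 :: rest).getD (k + 1) none != (v0 :: v0 :: rest).getD (k + 1 + 1) none)
              || ((v0 :: v0 :: rest).getD (k + 1) none == none))))
          = (List.range rest.length).all
          (fun k => !(((v0 :: rest).getD k none != (v0 :: rest).getD (k + 1) none)
              || ((v0 :: rest).getD k none == none))) := by
        refine List.all_congr rfl (fun k => ?_)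
        simp
      rw [hshift, h2]
      cases rest with
      | nil => simp
      | cons v2 r2 =>
        cases hs : v0.isSome <;> simp [hs]
    · have hne : (v0 == v1) = false := by
        rw [beq_eq_false_iff_ne]; exact hv
      have hne' : (v1 == v0) = false := by
        rw [beq_eq_false_iff_ne]; exact Ne.symm hv
      simp [bne, hne, hne']

-- map form of A's append-accumulating values loop
theorem pv_values_eq (d : PySem.Dict String (Option String)) (lst : List String) :
    lst.foldl (fun values key => values ++ [PySem.Dict.getD d key none]) []
      = lst.map (fun key => PySem.Dict.getD d key none) := by
  simpa using PySem.List.foldl_append_singleton_eq_map (fun key => PySem.Dict.getD d key none) lst []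

-- B's cardinality-and-membership test on set(v0 :: tl) equals the pivot form
theorem pv_set_eq (v0 : Option String) (tl : List (Option String)) :
    ((PySem.Set.len (PySem.Set.ofList (v0 :: tl)) == 1)
      && !(PySem.Set.contains (PySem.Set.ofList (v0 :: tl)) none))
    = (v0.isSome && tl.all (fun v => v == v0)) := by
  have hcons : PySem.Set.ofList (v0 :: tl)
      = v0 :: PySem.Set.discard (PySem.Set.ofList tl) v0 := PySem.Set.ofList_cons v0 tl
  by_cases hall : ∀ v ∈ tl, v = v0
  · have hd : PySem.Set.discard (PySem.Set.ofList tl) v0 = [] := by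
      rw [List.eq_nil_iff_forall_not_mem]
      intro y hy
      rw [PySem.Set.mem_discard, PySem.Set.mem_ofList] at hy
      exact hy.2 (hall y hy.1)
    have hset : PySem.Set.ofList (v0 :: tl) = [v0] := by rw [hcons, hd]
    have hallb : tl.all (fun v => v == v0) = true := by
      rw [List.all_eq_true]; intro v hv; exact beq_iff_eq.mpr (hall v hv)
    rw [hset, hallb]
    cases v0 <;> simp [PySem.Set.len, PySem.Set.contains]
  · push Not at hall
    obtain ⟨y, hy, hyne⟩ := hall
    have hmem : y ∈ PySem.Set.discard (PySem.Set.ofList tl) v0 := by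
      rw [PySem.Set.mem_discard, PySem.Set.mem_ofList]
      exact ⟨hy, hyne⟩
    have hlen : 1 < (PySem.Set.ofList (v0 :: tl)).length := by
      rw [hcons]
      have : 0 < (PySem.Set.discard (PySem.Set.ofList tl) v0).length :=
        List.length_pos_of_mem hmem
      simp only [List.length_cons]; omega
    have h1 : (PySem.Set.len (PySem.Set.ofList (v0 :: tl)) == 1) = false := by
      simp only [PySem.Set.len]
      rw [beq_eq_false_iff_ne]
      omega
    have h2 : tl.all (fun v => v == v0) = false := by
      rw [List.all_eq_false]
      exact ⟨y, hy, by simpa using hyne⟩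
    rw [h1, h2]
    simp

-- ===== VERDICT (by name: the statement is the Claim_ definition above) =====
theorem check_fields_py_spec : Claim_equal_check_fields_py := by
  intro dct lst _
  unfold Spec_check_fields_py check_fields_py check_fields_py_alt
  simp only [pv_values_eq]
  have hlm : (lst.map (fun key => PySem.Dict.getD (PySem.Dict.mk dct) key none)).length
      = lst.length := List.length_map ..
  set vs := lst.map (fun key => PySem.Dict.getD (PySem.Dict.mk dct) key none) with hvs
  clear_value vs
  clear hvs
  rw [PySem.List.pyRange_one]
  have hlen : (((vs.length : Int) - 1) - 0).toNat = vs.length - 1 := by omega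
  rw [hlen]
  simp only [zero_add]
  rw [List.foldl_map]
  rw [pv_foldl_flag (fun (k : Nat) =>
      ((PySem.List.pyGetD vs (k : Int) none != PySem.List.pyGetD vs ((k : Int) + 1) none)
        || (PySem.List.pyGetD vs (k : Int) none == none)))]
  simp only [Bool.true_and]
  have hcast : ∀ (k : Nat), ((k : Int) + 1) = ((k + 1 : Nat) : Int) := by intro k; push_cast; ring
  cases vs with
  | nil =>
    simp only [List.length_nil] at hlm
    simp [show lst.length ≤ 1 by omega]
  | cons v0 tl =>
    have hall : (List.range ((v0 :: tl).length - 1)).all (fun k =>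
        !((PySem.List.pyGetD (v0 :: tl) (k : Int) none != PySem.List.pyGetD (v0 :: tl) ((k : Int) + 1) none)
          || (PySem.List.pyGetD (v0 :: tl) (k : Int) none == none)))
        = (List.range tl.length).all (fun k =>
          !(((v0 :: tl).getD k none != (v0 :: tl).getD (k + 1) none)
            || ((v0 :: tl).getD k none == none))) := by
      simp only [List.length_cons, Nat.add_sub_cancel]
      refine List.all_congr rfl (fun k => ?_)
      rw [hcast k]
      simp only [PySem.List.pyGetD_natCast]
    rw [hall, pv_chain_eq]
    cases tl with
    | nil =>
      simp only [List.length_cons, List.length_nil] at hlm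
      simp [show lst.length ≤ 1 by omega]
    | cons v1 r =>
      have hgt : ¬ lst.length ≤ 1 := by simp at hlm; omega
      rw [if_neg hgt, pv_set_eq v0 (v1 :: r)]
      simp
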